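-- pv_equiv track=rewrite | github.com/Aasthaengg/IBMdataset | Python_codes/p03285/s064180233.py | actual
-- ===== SOURCE A (Python) =====
-- def actual(N):
--     # 0 <= ケーキの数   <= N/4
--     # 0 <= ドーナツの数 <= N/7
--     # その範囲で (ケーキの数A, ドーナツの数B) を全探索する
--     # N = 4A + 7B を満たす組があれば Yes
--     n_max_cakes = N // 4
--     n_max_donuts = N // 7
--
--     for n_cakes in range(n_max_cakes + 1):
--         for n_donuts in range(n_max_donuts + 1):
--             price = (4 * n_cakes) + (7 * n_donuts)
--
--             if price == N:
--                 return 'Yes'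
--
--     return 'No'
-- ===== SOURCE B (Python) =====
-- def actual(N):
--     # Closed-form Frobenius test for coins {4, 7}: every N >= 18 is representable
--     # (Frobenius number 4*7-4-7 = 17), so only a fixed finite set of small N fails.
--     return 'Yes' if N >= 0 and N not in (1, 2, 3, 5, 6, 9, 10, 13, 17) else 'No'
-- ===== Notes on version B (the rewrite author's own statement) =====
-- stated objective: faster
-- what changed: Replaced the O(N^2) nested brute-force search over (cakes, donuts) pairs by an O(1) closed-form Frobenius test: N is representable as 4a+7b iff N >= 0 and N is not one of the nine non-representable values up to the Frobenius number 17.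
import Mathlib
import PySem

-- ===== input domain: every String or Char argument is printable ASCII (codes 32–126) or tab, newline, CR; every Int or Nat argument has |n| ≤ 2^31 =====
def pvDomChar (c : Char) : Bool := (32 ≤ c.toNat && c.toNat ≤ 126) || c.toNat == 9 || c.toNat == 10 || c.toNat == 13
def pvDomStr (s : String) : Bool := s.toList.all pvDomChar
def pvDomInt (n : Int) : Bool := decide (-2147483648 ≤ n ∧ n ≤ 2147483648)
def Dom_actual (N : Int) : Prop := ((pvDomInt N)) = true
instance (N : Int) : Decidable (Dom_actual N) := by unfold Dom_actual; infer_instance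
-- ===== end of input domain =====

-- B replaces A's O(N^2) brute-force search over (cakes, donuts) pairs by an O(1)
-- closed-form Frobenius test (objective: faster).

-- ===== PORT A =====
-- nested for-loops with early 'return Yes' ported as nested List.any over the same ranges
def actual (N : Int) : String :=
  let nMaxCakes := PySem.Int.floordiv N 4
  let nMaxDonuts := PySem.Int.floordiv N 7
  if (PySem.List.pyRange 0 (nMaxCakes + 1) 1).any (fun nCakes =>
       (PySem.List.pyRange 0 (nMaxDonuts + 1) 1).any (fun nDonuts =>
         (4 * nCakes) + (7 * nDonuts) == N))
  then "Yes" else "No"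

-- ===== PORT B =====
def actual_alt (N : Int) : String :=
  if (N ≥ 0 && !(([1, 2, 3, 5, 6, 9, 10, 13, 17] : List Int).contains N))
  then "Yes" else "No"

-- ===== PRECONDITION & SPEC =====
def Spec_actual (N : Int) (out : String) : Prop := out = actual_alt N
instance (N : Int) (out : String) : Decidable (Spec_actual N out) := by unfold Spec_actual; infer_instance

-- ===== CLAIM (what is proved, stated in full; the proofs are below) =====
def Claim_equal_actual : Prop := ∀ (N : Int), Dom_actual N → Spec_actual N (actual N)

-- ===== LEMMAS AND PROOFS =====

-- A's nested search succeeds iff N = 4a + 7b has a nonnegative solution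
lemma actual_cond_iff (N : Int) :
    ((PySem.List.pyRange 0 (PySem.Int.floordiv N 4 + 1) 1).any (fun nCakes =>
       (PySem.List.pyRange 0 (PySem.Int.floordiv N 7 + 1) 1).any (fun nDonuts =>
         (4 * nCakes) + (7 * nDonuts) == N)) = true)
    ↔ ∃ a b : Int, 0 ≤ a ∧ 0 ≤ b ∧ 4 * a + 7 * b = N := by
  rw [PySem.Int.floordiv_eq_ediv_of_pos (a := N) (by norm_num : (0:Int) < 4),
      PySem.Int.floordiv_eq_ediv_of_pos (a := N) (by norm_num : (0:Int) < 7)]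
  simp only [List.any_eq_true, PySem.List.mem_pyRange_one, beq_iff_eq]
  constructor
  · rintro ⟨a, ⟨ha0, _⟩, b, ⟨hb0, _⟩, h⟩
    exact ⟨a, b, ha0, hb0, h⟩
  · rintro ⟨a, b, ha0, hb0, h⟩
    exact ⟨a, ⟨ha0, by omega⟩, b, ⟨hb0, by omega⟩, h⟩

-- the Frobenius characterisation for coins {4,7}
lemma rep_iff (N : Int) :
    (∃ a b : Int, 0 ≤ a ∧ 0 ≤ b ∧ 4 * a + 7 * b = N)
    ↔ (0 ≤ N ∧ N ≠ 1 ∧ N ≠ 2 ∧ N ≠ 3 ∧ N ≠ 5 ∧ N ≠ 6 ∧ N ≠ 9 ∧ N ≠ 10 ∧ N ≠ 13 ∧ N ≠ 17) := by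
  constructor
  · rintro ⟨a, b, ha, hb, h⟩; omega
  · rintro h
    have h4 : N % 4 = 0 ∨ N % 4 = 1 ∨ N % 4 = 2 ∨ N % 4 = 3 := by omega
    rcases h4 with h4 | h4 | h4 | h4
    · exact ⟨N / 4, 0, by omega, by omega, by omega⟩
    · exact ⟨(N - 21) / 4, 3, by omega, by omega, by omega⟩
    · exact ⟨(N - 14) / 4, 2, by omega, by omega, by omega⟩
    · exact ⟨(N - 7) / 4, 1, by omega, by omega, by omega⟩

theorem actual_eq (N : Int) : actual N = actual_alt N := by
  have hA := (actual_cond_iff N).trans (rep_iff N)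
  have hB : ((N ≥ 0 && !(([1, 2, 3, 5, 6, 9, 10, 13, 17] : List Int).contains N)) = true)
      ↔ (0 ≤ N ∧ N ≠ 1 ∧ N ≠ 2 ∧ N ≠ 3 ∧ N ≠ 5 ∧ N ≠ 6 ∧ N ≠ 9 ∧ N ≠ 10 ∧ N ≠ 13 ∧ N ≠ 17) := by
    simp only [ge_iff_le, Bool.and_eq_true, decide_eq_true_eq, Bool.not_eq_true',
      List.contains_eq_mem, decide_eq_false_iff_not, List.mem_cons, List.not_mem_nil, or_false]
    omega
  simp only [actual, actual_alt]
  split_ifs with h1 h2 h3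
  case _ => rfl
  case _ => exact absurd (hB.mpr (hA.mp h1)) h2
  case _ => exact absurd (hA.mpr (hB.mp h3)) h1
  case _ => rfl

-- ===== VERDICT (by name: the statement is the Claim_ definition above) =====
theorem actual_spec : Claim_equal_actual := by
  intro N _
  unfold Spec_actual
  exact actual_eq N
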